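-- pv_equiv track=rewrite | github.com/nbeshouri/universal_transformer | ut/data.py | get_story_sents
-- ===== SOURCE A (Python) =====
-- def get_story_sents(stories, period_symbol):
--     output = []
--     for story in stories:
--         sents = []
--         cur_sent = []
--         for word in story:
--             cur_sent.append(word)
--             if word == period_symbol:
--                 cur_sent.append(1)  # <EOS>
--                 sents.append(cur_sent)
--                 cur_sent = []
--         output.append(sents)
--     return output
-- ===== SOURCE B (Python) =====
-- def _split_story(story, period_symbol):
--     positions = [i for i, w in enumerate(story) if w == period_symbol]
--     sents = []
--     prev = 0
--     for pos in positions: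
--         sents.append(story[prev:pos + 1] + [1])  # EOS marker inside the slice
--         prev = pos + 1
--     return sents
--
--
-- def get_story_sents(stories, period_symbol):
--     return [_split_story(story, period_symbol) for story in stories]
-- ===== Notes on version B (the rewrite author's own statement) =====
-- stated objective: alternative
-- what changed: B first collects the indices of all period symbols per story, then builds each sentence by slicing between consecutive period positions (dropping the tail after the last period), instead of A's single accumulator loop that grows a current sentence word by word.
import Mathlib
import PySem

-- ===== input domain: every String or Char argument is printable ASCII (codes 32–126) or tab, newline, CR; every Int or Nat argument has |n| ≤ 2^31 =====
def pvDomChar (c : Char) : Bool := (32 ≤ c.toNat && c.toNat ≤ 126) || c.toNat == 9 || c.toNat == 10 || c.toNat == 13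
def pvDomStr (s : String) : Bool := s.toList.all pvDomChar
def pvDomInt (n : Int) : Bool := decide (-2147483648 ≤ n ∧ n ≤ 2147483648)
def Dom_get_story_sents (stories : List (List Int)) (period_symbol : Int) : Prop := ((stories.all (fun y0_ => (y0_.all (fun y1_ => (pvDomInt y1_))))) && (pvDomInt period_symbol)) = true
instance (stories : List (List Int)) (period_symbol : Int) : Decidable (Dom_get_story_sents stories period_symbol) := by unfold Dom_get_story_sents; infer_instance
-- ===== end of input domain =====

-- B splits each story by first collecting the indices of all period symbols and then
-- slicing each sentence out (appending the EOS 1), instead of A's word-by-word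
-- accumulator loop; an alternative decomposition of the same cost.

-- ===== PORT A =====
-- one step of A's inner loop: append the word, close the sentence on a period
def pvStepA (period_symbol : Int) (st : List (List Int) × List Int) (w : Int) :
    List (List Int) × List Int :=
  let cur := st.2 ++ [w]
  if w = period_symbol then (st.1 ++ [cur ++ [1]], []) else (st.1, cur)

def get_story_sents (stories : List (List Int)) (period_symbol : Int) : List (List (List Int)) :=
  stories.foldl
    (fun output story => output ++ [(story.foldl (pvStepA period_symbol) ([], [])).1])
    []

-- ===== PORT B =====
-- [i for i, w in enumerate(story) if w == period_symbol]
def pvPositions (story : List Int) (period_symbol : Int) : List Int :=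
  ((PySem.List.enumerate story).filter (fun iw => iw.2 == period_symbol)).map (·.1)

-- one step of B's loop over period positions: slice out story[prev:pos+1] + [1]
def pvStepB (story : List Int) (st : List (List Int) × Int) (pos : Int) :
    List (List Int) × Int :=
  (st.1 ++ [PySem.List.slice story (some st.2) (some (pos + 1)) ++ [1]], pos + 1)

def pvSplitStory (story : List Int) (period_symbol : Int) : List (List Int) :=
  ((pvPositions story period_symbol).foldl (pvStepB story) ([], 0)).1

def get_story_sents_alt (stories : List (List Int)) (period_symbol : Int) : List (List (List Int)) :=
  stories.map (fun story => pvSplitStory story period_symbol)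

-- ===== PRECONDITION & SPEC =====
def Spec_get_story_sents (stories : List (List Int)) (period_symbol : Int) (out : List (List (List Int))) : Prop := out = get_story_sents_alt stories period_symbol
instance (stories : List (List Int)) (period_symbol : Int) (out : List (List (List Int))) : Decidable (Spec_get_story_sents stories period_symbol out) := by unfold Spec_get_story_sents; infer_instance

-- ===== CLAIM (what is proved, stated in full; the proofs are below) =====
def Claim_equal_get_story_sents : Prop := ∀ (stories : List (List Int)) (period_symbol : Int), Dom_get_story_sents stories period_symbol → Spec_get_story_sents stories period_symbol (get_story_sents stories period_symbol)

-- ===== LEMMAS AND PROOFS =====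

-- reference splitter both inner loops are proved equal to
def gsp (p : Int) : List Int → List (List Int)
  | [] => []
  | w :: rest =>
      if w = p then (w :: [1]) :: gsp p rest
      else match gsp p rest with
           | [] => []
           | s :: ss => (w :: s) :: ss

-- period positions, as naturals, by structural recursion
def posN (p : Int) : List Int → List Nat
  | [] => []
  | w :: rest => if w = p then 0 :: (posN p rest).map (· + 1) else (posN p rest).map (· + 1)

-- B's fold over positions, in natural-number form
def bfoldN (story : List Int) : List Nat → List (List Int) → Nat → List (List Int)
  | [], sents, _ => sents
  | i :: is, sents, prev =>
      bfoldN story is (sents ++ [(story.drop prev).take (i + 1 - prev) ++ [1]]) (i + 1)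

theorem stepA_pos {p w : Int} (st : List (List Int) × List Int) (h : w = p) :
    pvStepA p st w = (st.1 ++ [st.2 ++ [w] ++ [1]], []) := by
  simp [pvStepA, h]

theorem stepA_neg {p w : Int} (st : List (List Int) × List Int) (h : ¬ w = p) :
    pvStepA p st w = (st.1, st.2 ++ [w]) := by
  simp [pvStepA, h]

theorem foldlA_split (p : Int) :
    ∀ (story : List Int) (sents : List (List Int)) (cur : List Int),
      (story.foldl (pvStepA p) (sents, cur)).1
        = sents ++ (story.foldl (pvStepA p) ([], cur)).1 := by
  intro story
  induction story with
  | nil => intro sents cur; simp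
  | cons w rest ih =>
      intro sents cur
      simp only [List.foldl_cons]
      by_cases h : w = p
      · rw [stepA_pos _ h, stepA_pos _ h]
        dsimp only
        rw [ih, ih ([] ++ [cur ++ [w] ++ [1]])]
        simp
      · rw [stepA_neg _ h, stepA_neg _ h]
        exact ih sents (cur ++ [w])

theorem foldlA_gsp (p : Int) :
    ∀ (story : List Int) (cur : List Int),
      (story.foldl (pvStepA p) ([], cur)).1
        = match gsp p story with
          | [] => []
          | s :: ss => (cur ++ s) :: ss := by
  intro story
  induction story with
  | nil => intro cur; simp [gsp]
  | cons w rest ih =>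
      intro cur
      simp only [List.foldl_cons]
      by_cases h : w = p
      · rw [stepA_pos _ h]
        simp only [gsp, if_pos h]
        rw [foldlA_split, ih []]
        cases hg : gsp p rest with
        | nil => simp
        | cons s ss => simp
      · rw [stepA_neg _ h]
        simp only [gsp, if_neg h]
        rw [ih (cur ++ [w])]
        cases hg : gsp p rest with
        | nil => simp
        | cons s ss => simp

theorem ainner_eq_gsp (p : Int) (story : List Int) :
    (story.foldl (pvStepA p) ([], [])).1 = gsp p story := by
  rw [foldlA_gsp]
  cases gsp p story <;> simp

theorem map_add_add (l : List Int) (a b : Int) :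
    (l.map (· + a)).map (· + b) = l.map (· + (a + b)) := by
  simp only [List.map_map, Function.comp_def]
  exact List.map_congr_left (fun x _ => by ring)

theorem map_cast_add_one (l : List Nat) :
    (l.map (fun n : Nat => (n : Int))).map (· + 1)
      = (l.map (· + 1)).map (fun n : Nat => (n : Int)) := by
  simp only [List.map_map, Function.comp_def]
  exact List.map_congr_left (fun a _ => by push_cast; ring)

theorem positions_shift (p : Int) :
    ∀ (xs : List Int) (s : Int),
      ((PySem.List.enumerate xs s).filter (fun iw => iw.2 == p)).map (·.1)
        = (((PySem.List.enumerate xs 0).filter (fun iw => iw.2 == p)).map (·.1)).map (· + s) := by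
  intro xs
  induction xs with
  | nil => intro s; simp [PySem.List.enumerate_nil]
  | cons w rest ih =>
      intro s
      rw [PySem.List.enumerate_cons, PySem.List.enumerate_cons, List.filter_cons,
        List.filter_cons]
      simp only [zero_add]
      by_cases h : w = p
      · rw [if_pos (show ((s, w).2 == p) = true by simpa using h),
          if_pos (show (((0 : Int), w).2 == p) = true by simpa using h)]
        simp only [List.map_cons]
        rw [ih (s + 1), ih 1, map_add_add]
        simp [add_comm]
      · rw [if_neg (by simpa using h : ¬ ((s, w).2 == p) = true),
          if_neg (by simpa using h : ¬ (((0 : Int), w).2 == p) = true)]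
        rw [ih (s + 1), ih 1, map_add_add]
        simp [add_comm]

theorem positions_eq_posN (p : Int) :
    ∀ story : List Int, pvPositions story p = (posN p story).map (fun n : Nat => (n : Int)) := by
  intro story
  induction story with
  | nil => simp [pvPositions, posN, PySem.List.enumerate_nil]
  | cons w rest ih =>
      simp only [pvPositions, PySem.List.enumerate_cons, List.filter_cons, zero_add]
      by_cases h : w = p
      · rw [if_pos (show (((0 : Int), w).2 == p) = true by simpa using h)]
        simp only [List.map_cons, posN, if_pos h]
        rw [positions_shift, ← pvPositions, ih, map_cast_add_one]
        simp
      · rw [if_neg (by simpa using h : ¬ (((0 : Int), w).2 == p) = true)]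
        simp only [posN, if_neg h]
        rw [positions_shift, ← pvPositions, ih, map_cast_add_one]

theorem bfold_cast (story : List Int) :
    ∀ (idxs : List Nat) (sents : List (List Int)) (prev : Nat),
      ((idxs.map (fun n : Nat => (n : Int))).foldl (pvStepB story) (sents, (prev : Int))).1
        = bfoldN story idxs sents prev := by
  intro idxs
  induction idxs with
  | nil => intro sents prev; simp [bfoldN]
  | cons i is ih =>
      intro sents prev
      simp only [List.map_cons, List.foldl_cons, pvStepB, bfoldN]
      have h1 : ((i : Int) + 1) = ((i + 1 : Nat) : Int) := by push_cast; ring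
      rw [h1, PySem.List.slice_natCast]
      exact ih _ (i + 1)

theorem bfoldN_split (story : List Int) :
    ∀ (idxs : List Nat) (sents : List (List Int)) (prev : Nat),
      bfoldN story idxs sents prev = sents ++ bfoldN story idxs [] prev := by
  intro idxs
  induction idxs with
  | nil => intro sents prev; simp [bfoldN]
  | cons i is ih =>
      intro sents prev
      simp only [bfoldN]
      rw [ih (sents ++ _), ih ([] ++ _)]
      simp

theorem bfoldN_shift (w : Int) (rest : List Int) :
    ∀ (idxs : List Nat) (sents : List (List Int)) (prev : Nat),
      bfoldN (w :: rest) (idxs.map (· + 1)) sents (prev + 1) = bfoldN rest idxs sents prev := by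
  intro idxs
  induction idxs with
  | nil => intro sents prev; simp [bfoldN]
  | cons i is ih =>
      intro sents prev
      simp only [List.map_cons, bfoldN, List.drop_succ_cons]
      have h : i + 1 + 1 - (prev + 1) = i + 1 - prev := by omega
      rw [h]
      exact ih _ (i + 1)

theorem binner_eq_gsp (p : Int) :
    ∀ story : List Int, bfoldN story (posN p story) [] 0 = gsp p story := by
  intro story
  induction story with
  | nil => simp [posN, bfoldN, gsp]
  | cons w rest ih =>
      by_cases h : w = p
      · simp only [posN, gsp, if_pos h, bfoldN, List.drop_zero, Nat.sub_zero,
          List.take_succ_cons, List.take_zero, List.nil_append]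
        have hsh := bfoldN_shift w rest (posN p rest) [[w] ++ [1]] 0
        simp only [Nat.zero_add] at hsh
        rw [hsh, bfoldN_split, ih]
        simp
      · simp only [posN, gsp, if_neg h]
        cases hp : posN p rest with
        | nil =>
            rw [hp] at ih
            simp only [bfoldN] at ih
            simp [bfoldN, ← ih]
        | cons q qs =>
            rw [hp] at ih
            simp only [List.map_cons, bfoldN, List.drop_zero, Nat.sub_zero, List.nil_append] at ih ⊢
            have htake : (w :: rest).take (q + 1 + 1) = w :: rest.take (q + 1) := by
              simp [List.take_succ_cons]
            rw [htake]
            rw [bfoldN_shift w rest qs [w :: rest.take (q + 1) ++ [1]] (q + 1)]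
            rw [bfoldN_split rest qs [w :: rest.take (q + 1) ++ [1]] (q + 1)]
            rw [bfoldN_split rest qs [rest.take (q + 1) ++ [1]] (q + 1)] at ih
            rw [← ih]
            simp

theorem split_story_eq (p : Int) (story : List Int) :
    pvSplitStory story p = (story.foldl (pvStepA p) ([], [])).1 := by
  rw [ainner_eq_gsp, pvSplitStory, positions_eq_posN]
  have h0 : (0 : Int) = ((0 : Nat) : Int) := rfl
  rw [h0, bfold_cast]
  exact binner_eq_gsp p story

theorem foldl_append_map (p : Int) :
    ∀ (stories : List (List Int)) (acc : List (List (List Int))),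
      stories.foldl (fun output story => output ++ [(story.foldl (pvStepA p) ([], [])).1]) acc
        = acc ++ stories.map (fun story => (story.foldl (pvStepA p) ([], [])).1) := by
  intro stories
  induction stories with
  | nil => intro acc; simp
  | cons s ss ih =>
      intro acc
      simp only [List.foldl_cons, List.map_cons]
      rw [ih]
      simp

-- ===== VERDICT (by name: the statement is the Claim_ definition above) =====
theorem get_story_sents_spec : Claim_equal_get_story_sents := by
  intro stories p _
  unfold Spec_get_story_sents get_story_sents get_story_sents_alt
  rw [foldl_append_map]
  simp only [List.nil_append]
  exact List.map_congr_left (fun story _ => (split_story_eq p story).symm)
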